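-- pv_equiv track=rewrite | github.com/SibiChakravarthy7311/AbelianStringMatching_ADS | AbelianPatternMatching.py | bruteForceApproach
-- ===== SOURCE A (Python) =====
-- from collections import defaultdict
--
-- def computeParikhVector(s):
--     parikhVector = defaultdict(int)
--     for i in s:
--         parikhVector[i] += 1
--     return parikhVector
--
-- def checkParikhVector(vector1, vector2):
--     if len(vector1) != len(vector2):
--         return False
--     for key in vector1:
--         if vector2[key] != vector1[key]:
--             return False
--     return True
--
-- def bruteForceApproach(y, x, m, n):
--     parikhVector = computeParikhVector(y)
--     indices = []
--     for i in range(n - m):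
--         parikhVectorX = defaultdict(int)
--         ind = i
--         for j in range(m):
--             parikhVectorX[x[ind]] += 1
--             ind += 1
--         if checkParikhVector(parikhVector, parikhVectorX):
--             indices.append(i)
--     return indices
-- ===== SOURCE B (Python) =====
-- def bruteForceApproach(y, x, m, n):
--     # Sliding window over x with incremental count updates: O(n*sigma + m) instead of O(n*m).
--     limit = n - m
--     if limit <= 0:
--         return []
--     target = {}
--     for c in y:
--         target[c] = target.get(c, 0) + 1
--     if m <= 0:
--         return list(range(limit)) if not target else []
--     window = {}
--     for c in x[0:m]:
--         window[c] = window.get(c, 0) + 1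
--     res = []
--     if window == target:
--         res.append(0)
--     for i in range(1, limit):
--         out_c = x[i - 1]
--         in_c = x[i + m - 1]
--         window[in_c] = window.get(in_c, 0) + 1
--         if window[out_c] == 1:
--             del window[out_c]
--         else:
--             window[out_c] -= 1
--         if window == target:
--             res.append(i)
--     return res
-- ===== Notes on version B (the rewrite author's own statement) =====
-- stated objective: faster
-- what changed: A recounts every length-m window from scratch (and rebuilds its dict) for each of the n-m starts; B counts the first window once, then slides it, updating the count dict incrementally by the one leaving and one entering character per step.
import Mathlib
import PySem

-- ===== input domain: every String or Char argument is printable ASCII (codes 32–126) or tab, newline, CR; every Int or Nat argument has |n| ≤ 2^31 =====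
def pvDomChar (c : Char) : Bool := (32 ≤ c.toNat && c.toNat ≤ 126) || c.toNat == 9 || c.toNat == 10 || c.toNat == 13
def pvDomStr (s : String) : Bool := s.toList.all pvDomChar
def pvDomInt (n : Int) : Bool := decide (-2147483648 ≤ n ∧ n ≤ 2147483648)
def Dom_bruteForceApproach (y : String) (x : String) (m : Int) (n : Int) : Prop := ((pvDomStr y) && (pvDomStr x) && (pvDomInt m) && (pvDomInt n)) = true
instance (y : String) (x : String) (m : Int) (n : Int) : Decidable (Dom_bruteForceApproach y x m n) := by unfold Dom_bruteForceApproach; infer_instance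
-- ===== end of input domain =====

-- B replaces A's per-window recount (O(n·m)) by a sliding window with incremental dict updates.

-- ===== PORT A =====
def computeParikhVectorA (s : List Char) : PySem.Dict Char Int :=
  s.foldl (fun d c => d.modify c 0 (· + 1)) PySem.Dict.empty

def checkParikhVectorA (v1 v2 : PySem.Dict Char Int) : Bool :=
  if v1.size ≠ v2.size then false
  else v1.keys.foldl (fun ok k => if v2.getD k 0 ≠ v1.getD k 0 then false else ok) true

-- one step of A's inner `for j in range(m)` loop: parikhVectorX[x[ind]] += 1; ind += 1
-- (x[ind] out of range raises IndexError in Python; Pre_ excludes those inputs, the `none` branch is unreachable there)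
def innerStepA (xs : List Char) (st : PySem.Dict Char Int × Int) : PySem.Dict Char Int × Int :=
  match PySem.List.pyGet? xs st.2 with
  | some c => (st.1.modify c 0 (· + 1), st.2 + 1)
  | none => (st.1, st.2 + 1)

def bruteForceApproach (y : String) (x : String) (m : Int) (n : Int) : List Int :=
  let parikhVector := computeParikhVectorA y.toList
  (PySem.List.pyRange 0 (n - m)).foldl
    (fun indices i =>
      let st := (PySem.List.pyRange 0 m).foldl (fun st _ => innerStepA x.toList st) (PySem.Dict.empty, i)
      if checkParikhVectorA parikhVector st.1 then indices ++ [i] else indices)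
    []

-- ===== PORT B =====
-- Python `dict ==` (order-insensitive): same number of keys, and every key of a maps to the same value in b
def dictEqB (a b : PySem.Dict Char Int) : Bool :=
  a.size == b.size && a.keys.all (fun k => b.get? k == a.get? k)

-- window[c] = window.get(c, 0) + 1
def bumpB (d : PySem.Dict Char Int) (c : Char) : PySem.Dict Char Int :=
  d.insert c (d.getD c 0 + 1)

-- one iteration of B's slide loop (x[i-1] / x[i+m-1] out of range raises IndexError in Python; Pre_ excludes those
-- inputs, the fallthrough branch is unreachable there; likewise window[out_c] always exists there, so getD is exact)
def slideStepB (xs : List Char) (target : PySem.Dict Char Int) (m : Int)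
    (st : PySem.Dict Char Int × List Int) (i : Int) : PySem.Dict Char Int × List Int :=
  match PySem.List.pyGet? xs (i - 1), PySem.List.pyGet? xs (i + m - 1) with
  | some outC, some inC =>
      let w1 := bumpB st.1 inC
      let w2 := if w1.getD outC 0 == 1 then w1.erase outC else w1.insert outC (w1.getD outC 0 - 1)
      (w2, if dictEqB w2 target then st.2 ++ [i] else st.2)
  | _, _ => st

def bruteForceApproach_alt (y : String) (x : String) (m : Int) (n : Int) : List Int :=
  let limit := n - m
  if limit ≤ 0 then []
  else
    let target := y.toList.foldl bumpB PySem.Dict.empty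
    if m ≤ 0 then
      (if target.size = 0 then PySem.List.pyRange 0 limit else [])
    else
      let window0 := (PySem.List.slice x.toList (some 0) (some m)).foldl bumpB PySem.Dict.empty
      let res0 : List Int := if dictEqB window0 target then [0] else []
      ((PySem.List.pyRange 1 limit).foldl (slideStepB x.toList target m) (window0, res0)).2

-- ===== PRECONDITION & SPEC =====
-- Exactly the inputs on which A never indexes x out of range (otherwise Python raises IndexError):
-- A reads x[i+j] for 0 ≤ i < n-m, 0 ≤ j < m, whose maximum is n-2 when both ranges are nonempty.
def Pre_bruteForceApproach (y : String) (x : String) (m : Int) (n : Int) : Prop :=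
  n - m ≤ 0 ∨ m ≤ 0 ∨ n ≤ (x.toList.length : Int) + 1

instance (y : String) (x : String) (m : Int) (n : Int) : Decidable (Pre_bruteForceApproach y x m n) := by
  unfold Pre_bruteForceApproach; infer_instance

def pvWitness_bruteForceApproach : String × String × Int × Int := ("ab", "aba", 2, 3)

def Spec_bruteForceApproach (y : String) (x : String) (m : Int) (n : Int) (out : List Int) : Prop :=
  out = bruteForceApproach_alt y x m n
instance (y : String) (x : String) (m : Int) (n : Int) (out : List Int) : Decidable (Spec_bruteForceApproach y x m n out) := by
  unfold Spec_bruteForceApproach; infer_instance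

-- ===== CLAIM (what is proved, stated in full; the proofs are below) =====
def Claim_equal_bruteForceApproach : Prop := ∀ (y : String) (x : String) (m : Int) (n : Int), Dom_bruteForceApproach y x m n → Pre_bruteForceApproach y x m n → Spec_bruteForceApproach y x m n (bruteForceApproach y x m n)

-- ===== LEMMAS AND PROOFS =====

-- the character window x[i:i+m] (what A's inner loop reads, index by index)
def win (xs : List Char) (i m : Int) : List Char := (xs.drop i.toNat).take m.toNat

-- d is the count dict of the character list l: unique keys, lookups are exactly the nonzero counts
def CntDict (l : List Char) (d : PySem.Dict Char Int) : Prop :=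
  d.keys.Nodup ∧ ∀ c, d.get? c = if List.count c l = 0 then none else some (List.count c l : Int)

lemma cntdict_counter (l : List Char) : CntDict l (PySem.Dict.counter l) := by
  refine ⟨PySem.Dict.nodup_keys_counter l, fun c => ?_⟩
  by_cases h : List.count c l = 0
  · have hmem : c ∉ (PySem.Dict.counter l).keys := by
      rw [PySem.Dict.keys_counter]
      intro hc
      have : c ∈ l := by
        have := PySem.Set.mem_ofList (xs := l) (y := c)
        tauto
      simp [List.count_eq_zero] at h
      exact h this
    simp [h, (PySem.Dict.get?_eq_none_iff_not_mem_keys _ c).mpr hmem]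
  · have hmem : c ∈ l := by
      by_contra hc; exact h (List.count_eq_zero.mpr hc)
    have hcont : (PySem.Dict.counter l).contains c = true := by
      rw [PySem.Dict.contains_counter]; simpa using hmem
    have hsome : ((PySem.Dict.counter l).get? c).isSome := by
      rw [← PySem.Dict.contains_eq_isSome_get?]; exact hcont
    obtain ⟨v, hv⟩ := Option.isSome_iff_exists.mp hsome
    have hgd := PySem.Dict.getD_counter l c
    rw [PySem.Dict.getD_eq_get?_getD, hv] at hgd
    simp at hgd
    simp [h, hv, hgd]

lemma getD_of_cnt {l : List Char} {d : PySem.Dict Char Int} (h : CntDict l d) (c : Char) :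
    d.getD c 0 = (List.count c l : Int) := by
  rw [PySem.Dict.getD_eq_get?_getD, h.2 c]
  split <;> simp_all

lemma mem_keys_of_cnt {l : List Char} {d : PySem.Dict Char Int} (h : CntDict l d) (c : Char) :
    c ∈ d.keys ↔ List.count c l ≠ 0 := by
  constructor
  · intro hc hcnt
    exact (PySem.Dict.get?_eq_none_iff_not_mem_keys d c).mp (by rw [h.2 c]; simp [hcnt]) hc
  · intro hcnt
    by_contra hc
    have := (PySem.Dict.get?_eq_none_iff_not_mem_keys d c).mpr hc
    rw [h.2 c] at this
    simp [hcnt] at this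

lemma size_eq_keys_length (d : PySem.Dict Char Int) : d.size = d.keys.length := by
  simp [PySem.Dict.size, PySem.Dict.keys]

lemma cnt_eq_iff {l1 l2 : List Char} {d1 d2 : PySem.Dict Char Int}
    (h1 : CntDict l1 d1) (h2 : CntDict l2 d2) :
    (d1.size = d2.size ∧ ∀ c ∈ d1.keys, List.count c l2 = List.count c l1) ↔
      (∀ c, List.count c l2 = List.count c l1) := by
  constructor
  · rintro ⟨hsz, hk⟩ c
    by_cases hc : c ∈ d1.keys
    · exact hk c hc
    · have h1c : List.count c l1 = 0 := by
        by_contra h; exact hc ((mem_keys_of_cnt h1 c).mpr h)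
      have hsub : d1.keys.toFinset ⊆ d2.keys.toFinset := by
        intro k hkmem
        rw [List.mem_toFinset] at hkmem ⊢
        rw [mem_keys_of_cnt h2 k, hk k hkmem]
        exact (mem_keys_of_cnt h1 k).mp hkmem
      have hcard : d2.keys.toFinset.card ≤ d1.keys.toFinset.card := by
        rw [List.toFinset_card_of_nodup h1.1, List.toFinset_card_of_nodup h2.1,
          ← size_eq_keys_length, ← size_eq_keys_length, hsz]
      have hfe := Finset.eq_of_subset_of_card_le hsub hcard
      have h2c : List.count c l2 = 0 := by
        by_contra h
        have : c ∈ d2.keys := (mem_keys_of_cnt h2 c).mpr h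
        have : c ∈ d1.keys := by
          rw [← List.mem_toFinset, ← hfe, List.mem_toFinset] at this; exact this
        exact hc this
      rw [h1c, h2c]
  · intro hall
    refine ⟨?_, fun c _ => hall c⟩
    have hfe : d1.keys.toFinset = d2.keys.toFinset := by
      ext c
      rw [List.mem_toFinset, List.mem_toFinset, mem_keys_of_cnt h1 c, mem_keys_of_cnt h2 c, hall c]
    rw [size_eq_keys_length, size_eq_keys_length, ← List.toFinset_card_of_nodup h1.1,
      ← List.toFinset_card_of_nodup h2.1, hfe]

lemma checkA_eq {l1 l2 : List Char} {d1 d2 : PySem.Dict Char Int}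
    (h1 : CntDict l1 d1) (h2 : CntDict l2 d2) :
    checkParikhVectorA d1 d2 = decide (l2.Perm l1) := by
  have hiff : checkParikhVectorA d1 d2 = true ↔ l2.Perm l1 := by
    rw [List.perm_iff_count]
    have : (∀ a, List.count a l2 = List.count a l1) ↔ ∀ c, List.count c l2 = List.count c l1 := Iff.rfl
    rw [this, ← cnt_eq_iff h1 h2]
    unfold checkParikhVectorA
    by_cases hsz : d1.size = d2.size
    · rw [if_neg (by simpa using hsz)]
      have hb : d1.keys.foldl (fun ok k => if d2.getD k 0 ≠ d1.getD k 0 then false else ok) true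
          = d1.keys.foldl (fun ok k => if (decide (d2.getD k 0 ≠ d1.getD k 0)) = true then false else ok) true := by
        apply PySem.List.foldl_congr_mem
        intro acc k _
        simp
      rw [hb, PySem.List.foldl_if_false_eq]
      simp [List.any_eq, getD_of_cnt h1, getD_of_cnt h2, hsz]
    · rw [if_pos (by simpa using hsz)]
      simp [hsz]
  rcases hb : checkParikhVectorA d1 d2 with _ | _
  · rw [hb] at hiff
    simp at hiff
    simp [hiff]
  · rw [hb] at hiff
    simp at hiff
    simp [hiff]

lemma dictEqB_eq {l1 l2 : List Char} {d1 d2 : PySem.Dict Char Int}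
    (h1 : CntDict l1 d1) (h2 : CntDict l2 d2) :
    dictEqB d1 d2 = decide (l2.Perm l1) := by
  have hiff : dictEqB d1 d2 = true ↔ l2.Perm l1 := by
    rw [List.perm_iff_count]
    rw [show (∀ a, List.count a l2 = List.count a l1) ↔ ∀ c, List.count c l2 = List.count c l1 from Iff.rfl,
      ← cnt_eq_iff h1 h2]
    unfold dictEqB
    simp only [Bool.and_eq_true, beq_iff_eq, List.all_eq_true]
    constructor
    · rintro ⟨hsz, hk⟩
      refine ⟨hsz, fun c hc => ?_⟩
      have := hk c hc
      rw [h1.2 c, h2.2 c] at this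
      have h1c : List.count c l1 ≠ 0 := (mem_keys_of_cnt h1 c).mp hc
      rw [if_neg h1c] at this
      by_cases h2c : List.count c l2 = 0
      · rw [if_pos h2c] at this; simp at this
      · rw [if_neg h2c] at this; simp at this; exact_mod_cast this
    · rintro ⟨hsz, hk⟩
      refine ⟨hsz, fun c hc => ?_⟩
      rw [h1.2 c, h2.2 c, hk c hc]
  rcases hb : dictEqB d1 d2 with _ | _ <;> rw [hb] at hiff <;> simp at hiff <;> simp [hiff]

lemma innerA_scan (xs : List Char) (k : Nat) :
    ∀ (a : Int) (d : PySem.Dict Char Int) (p : Int), 0 ≤ p → p.toNat + k ≤ xs.length →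
    (PySem.List.pyRange a (a + k)).foldl (fun st _ => innerStepA xs st) (d, p)
      = (((xs.drop p.toNat).take k).foldl (fun d c => d.modify c 0 (· + 1)) d, p + k) := by
  induction k with
  | zero =>
    intro a d p hp hlen
    rw [show (a + (0:Nat) : Int) = a by simp, PySem.List.pyRange_one_eq_nil le_rfl]
    simp
  | succ k ih =>
    intro a d p hp hlen
    have hlt : a < a + (k+1 : Nat) := by push_cast; omega
    rw [PySem.List.pyRange_one_cons hlt]
    have hplen : p.toNat < xs.length := by omega
    have hget : PySem.List.pyGet? xs p = some xs[p.toNat] :=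
      PySem.List.pyGet?_eq_some_getElem xs hp (by omega)
    have hdrop : xs.drop p.toNat = xs[p.toNat] :: xs.drop (p.toNat + 1) :=
      List.drop_eq_getElem_cons hplen
    rw [List.foldl_cons]
    show (PySem.List.pyRange (a+1) (a + (k+1:Nat))).foldl (fun st _ => innerStepA xs st) (innerStepA xs (d, p)) = _
    rw [show innerStepA xs (d, p) = (d.modify xs[p.toNat] 0 (· + 1), p + 1) by
      unfold innerStepA; rw [hget]]
    rw [show (a + (k+1:Nat) : Int) = (a + 1) + (k:Nat) by push_cast; ring]
    rw [ih (a+1) _ (p+1) (by omega) (by omega)]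
    rw [hdrop, show (p+1).toNat = p.toNat + 1 by omega]
    simp only [List.take_succ_cons, List.foldl_cons]
    congr 1
    push_cast; ring

lemma get?_erase_cnt (d : PySem.Dict Char Int) (k c : Char) :
    (d.erase k).get? c = if c = k then none else d.get? c := by
  rcases d with ⟨items⟩
  induction items with
  | nil => simp [PySem.Dict.erase, PySem.Dict.get?]
  | cons hd tl ih =>
    simp only [PySem.Dict.erase, PySem.Dict.get?, List.filter_cons] at *
    by_cases hk : hd.1 = k
    · simp only [hk, beq_self_eq_true, Bool.not_true, if_neg (by simp : ¬ (false = true))]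
      rw [ih]
      by_cases hc : c = k
      · simp [hc]
      · simp only [if_neg hc]
        rw [List.find?_cons_of_neg (by simp [hk]; exact fun h => hc h.symm)]
    · simp only [if_pos (by simp [hk] : (!hd.1 == k) = true)]
      by_cases hc : hd.1 = c
      · have hck : ¬ c = k := fun h => hk (by rw [hc, h])
        rw [List.find?_cons_of_pos (by simp [hc]), List.find?_cons_of_pos (by simp [hc])]
        simp [hck]
      · rw [List.find?_cons_of_neg (by simp [hc]), ih]
        by_cases hck : c = k
        · simp [hck]
        · simp only [if_neg hck]
          rw [List.find?_cons_of_neg (by simp [hc])]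

lemma nodup_keys_erase_cnt (d : PySem.Dict Char Int) (k : Char) (h : d.keys.Nodup) :
    (d.erase k).keys.Nodup := by
  have : (d.erase k).keys.Sublist d.keys := by
    simp only [PySem.Dict.keys, PySem.Dict.erase]
    exact List.filter_sublist.map _
  exact this.nodup h

lemma slide_window (xs : List Char) (m j : Int) (hm : 1 ≤ m) (hj : 1 ≤ j)
    (hub : j + m ≤ (xs.length : Int)) (w : PySem.Dict Char Int) (hw : CntDict (win xs (j-1) m) w)
    {outC inC : Char}
    (hout : PySem.List.pyGet? xs (j - 1) = some outC)
    (hin : PySem.List.pyGet? xs (j + m - 1) = some inC) :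
    CntDict (win xs j m)
      (if (bumpB w inC).getD outC 0 == 1 then (bumpB w inC).erase outC
       else (bumpB w inC).insert outC ((bumpB w inC).getD outC 0 - 1)) := by
  obtain ⟨mt, hmt⟩ : ∃ t : Nat, (t : Int) = m := ⟨m.toNat, by omega⟩
  obtain ⟨p, hpj⟩ : ∃ p : Nat, (p : Int) = j - 1 := ⟨(j-1).toNat, by omega⟩
  have hmt1 : 1 ≤ mt := by omega
  have hplen : p + mt < xs.length := by omega
  have htn : m.toNat = mt := by omega
  have hjn : j.toNat = p + 1 := by omega
  have hj1n : (j-1).toNat = p := by omega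
  rw [PySem.List.pyGet?_of_nonneg xs (show (0:Int) ≤ j - 1 by omega), hj1n] at hout
  obtain ⟨hplt, houtv⟩ := List.getElem?_eq_some_iff.mp hout
  rw [PySem.List.pyGet?_of_nonneg xs (show (0:Int) ≤ j + m - 1 by omega), show (j + m - 1).toNat = p + mt by omega] at hin
  obtain ⟨hplen2, hinv⟩ := List.getElem?_eq_some_iff.mp hin
  set mid : List Char := (xs.drop (p+1)).take (mt - 1) with hmid
  have hl : win xs (j-1) m = outC :: mid := by
    rw [win, hj1n, htn, List.drop_eq_getElem_cons hplt]
    rw [show mt = (mt - 1) + 1 by omega, List.take_succ_cons, houtv]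
  have hl' : win xs j m = mid ++ [inC] := by
    rw [win, hjn, htn, show mt = (mt - 1) + 1 by omega, List.take_add_one]
    congr 1
    rw [List.getElem?_drop, show p + 1 + (mt - 1) = p + mt by omega,
      List.getElem?_eq_getElem hplen, hinv]
    rfl
  obtain ⟨hnd, hget⟩ := hw
  rw [hl] at hget
  have hgd_in : w.getD inC 0 = (List.count inC (outC :: mid) : Int) := by
    rw [PySem.Dict.getD_eq_get?_getD, hget inC]; split <;> simp_all
  have hgd_out1 : (bumpB w inC).getD outC 0 =
      if outC = inC then (List.count inC (outC :: mid) : Int) + 1 else (List.count outC (outC :: mid) : Int) := by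
    rw [bumpB, PySem.Dict.getD_insert, hgd_in]
    split
    · rfl
    · rw [PySem.Dict.getD_eq_get?_getD, hget outC]; split <;> simp_all [List.count_cons_self]
  have hcout_pos : 1 ≤ List.count outC (outC :: mid) := by simp [List.count_cons_self]
  have hget1 : ∀ c, (bumpB w inC).get? c =
      if c = inC then some ((List.count inC (outC :: mid) : Int) + 1) else w.get? c := by
    intro c; rw [bumpB, PySem.Dict.get?_insert, hgd_in]
  have hcnt' : ∀ c, List.count c (win xs j m)
      = List.count c (outC :: mid) + (if c = inC then 1 else 0) - (if c = outC then 1 else 0) := by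
    intro c
    rw [hl']
    simp only [List.count_append, List.count_cons, List.count_nil, beq_iff_eq]
    by_cases h1 : c = inC <;> by_cases h2 : c = outC
    · have ho : outC = inC := h2.symm.trans h1
      simp [h1, h2, ho]
    · simp [h1, h2, show ¬ inC = outC from fun h => h2 (h1.trans h),
        show ¬ outC = inC from fun h => h2 (h1.trans h.symm)]
    · simp [h1, h2, show ¬ outC = inC from fun h => h1 (h2.trans h),
        show ¬ inC = outC from fun h => h1 (h2.trans h.symm)]
    · simp [h1, h2, show ¬ outC = c from fun h => h2 h.symm, show ¬ inC = c from fun h => h1 h.symm]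
  refine ⟨?_, ?_⟩
  · split
    · exact nodup_keys_erase_cnt _ _ (PySem.Dict.nodup_keys_insert w inC _ hnd)
    · exact PySem.Dict.nodup_keys_insert _ _ _ (PySem.Dict.nodup_keys_insert w inC _ hnd)
  · intro c
    rw [hcnt' c]
    by_cases hoi : outC = inC
    · -- the leaving and the entering character coincide: the window counts do not change
      subst hoi
      have hv : (bumpB w outC).getD outC 0 = (List.count outC (outC :: mid) : Int) + 1 := by
        rw [hgd_out1, if_pos rfl]
      have hne1 : ((bumpB w outC).getD outC 0 == 1) = false := by rw [hv]; simp; omega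
      rw [hne1]
      simp only [Bool.false_eq_true, if_false, PySem.Dict.get?_insert, hget1, hget, hv]
      by_cases hc : c = outC
      · subst hc
        have hx : List.count c (c :: mid) = List.count c mid + 1 := by simp
        simp [hx, List.count_cons] <;> (try split_ifs) <;>
            first
              | rfl
              | (exfalso; omega)
              | (simp only [Option.some.injEq]; push_cast; omega)
              | omega
              | (push_cast; omega)
      · simp [hc, List.count_cons] <;> (try split_ifs) <;>
            first
              | rfl
              | (exfalso; omega)
              | (simp only [Option.some.injEq]; push_cast; omega)
              | omega
              | (push_cast; omega)
    · -- distinct leaving/entering characters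
      have hv : (bumpB w inC).getD outC 0 = (List.count outC (outC :: mid) : Int) := by
        rw [hgd_out1, if_neg hoi]
      have hoi' : ¬ inC = outC := fun h => hoi h.symm
      by_cases h1 : List.count outC (outC :: mid) = 1
      · -- the last copy of outC leaves the window: Python deletes the key
        have hb : ((bumpB w inC).getD outC 0 == 1) = true := by rw [hv, h1]; simp
        rw [hb]
        simp only [if_true, get?_erase_cnt, hget1, hget]
        by_cases hc : c = outC
        · subst hc
          have hx : List.count c (c :: mid) = List.count c mid + 1 := by simp
          simp [hoi, hoi', h1, hx, List.count_cons] <;> (try split_ifs) <;>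
            first
              | rfl
              | (exfalso; omega)
              | (simp only [Option.some.injEq]; push_cast; omega)
              | omega
              | (push_cast; omega)
        · by_cases hci : c = inC
          · subst hci
            simp [hoi, hoi', hc, List.count_cons] <;> (try split_ifs) <;>
            first
              | rfl
              | (exfalso; omega)
              | (simp only [Option.some.injEq]; push_cast; omega)
              | omega
              | (push_cast; omega)
          · simp [hc, hci, List.count_cons] <;> (try split_ifs) <;>
            first
              | rfl
              | (exfalso; omega)
              | (simp only [Option.some.injEq]; push_cast; omega)
              | omega
              | (push_cast; omega)
      · -- outC stays in the window with a decremented count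
        have hb : ((bumpB w inC).getD outC 0 == 1) = false := by
          rw [hv]; simp only [beq_eq_false_iff_ne, ne_eq]; exact_mod_cast h1
        rw [hb]
        simp only [Bool.false_eq_true, if_false, PySem.Dict.get?_insert, hget1, hget, hv]
        by_cases hc : c = outC
        · subst hc
          have hx : List.count c (c :: mid) = List.count c mid + 1 := by simp
          simp [hoi, hoi', hx, List.count_cons] <;> (try split_ifs) <;>
            first
              | rfl
              | (exfalso; omega)
              | (simp only [Option.some.injEq]; push_cast; omega)
              | omega
              | (push_cast; omega)
        · by_cases hci : c = inC
          · subst hci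
            simp [hoi, hoi', hc, List.count_cons] <;> (try split_ifs) <;>
            first
              | rfl
              | (exfalso; omega)
              | (simp only [Option.some.injEq]; push_cast; omega)
              | omega
              | (push_cast; omega)
          · simp [hc, hci, List.count_cons] <;> (try split_ifs) <;>
            first
              | rfl
              | (exfalso; omega)
              | (simp only [Option.some.injEq]; push_cast; omega)
              | omega
              | (push_cast; omega)

lemma slideB_scan (xs ylist : List Char) (m : Int) (hm : 1 ≤ m) (k : Nat) :
    ∀ (j : Int) (w : PySem.Dict Char Int) (res : List Int), 1 ≤ j →
    (j + k + m - 1 : Int) ≤ (xs.length : Int) → CntDict (win xs (j-1) m) w →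
    ((PySem.List.pyRange j (j + k)).foldl (slideStepB xs (PySem.Dict.counter ylist) m) (w, res)).2
      = res ++ (PySem.List.pyRange j (j + k)).filter (fun i => decide (ylist.Perm (win xs i m))) := by
  induction k with
  | zero =>
    intro j w res hj hlen hw
    rw [show (j + ((0:Nat):Int)) = j by push_cast; ring, PySem.List.pyRange_one_eq_nil le_rfl]
    simp
  | succ k ih =>
    intro j w res hj hlen hw
    have hlt : j < j + ((k+1 : Nat) : Int) := by push_cast; omega
    rw [PySem.List.pyRange_one_cons hlt,
      show (j + ((k+1:Nat) : Int)) = (j + 1) + (k : Nat) by push_cast; ring]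
    have hout : PySem.List.pyGet? xs (j-1) = some (xs[(j-1).toNat]'(by omega)) :=
      PySem.List.pyGet?_eq_some_getElem xs (by omega) (by omega)
    have hin : PySem.List.pyGet? xs (j+m-1) = some (xs[(j+m-1).toNat]'(by omega)) :=
      PySem.List.pyGet?_eq_some_getElem xs (by omega) (by omega)
    have hw2 := slide_window xs m j hm hj (by omega) w hw hout hin
    have hstep : slideStepB xs (PySem.Dict.counter ylist) m (w, res) j =
        ((if (bumpB w (xs[(j+m-1).toNat]'(by omega))).getD (xs[(j-1).toNat]'(by omega)) 0 == 1 then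
            (bumpB w (xs[(j+m-1).toNat]'(by omega))).erase (xs[(j-1).toNat]'(by omega))
          else (bumpB w (xs[(j+m-1).toNat]'(by omega))).insert (xs[(j-1).toNat]'(by omega))
            ((bumpB w (xs[(j+m-1).toNat]'(by omega))).getD (xs[(j-1).toNat]'(by omega)) 0 - 1)),
         (if dictEqB (if (bumpB w (xs[(j+m-1).toNat]'(by omega))).getD (xs[(j-1).toNat]'(by omega)) 0 == 1 then
            (bumpB w (xs[(j+m-1).toNat]'(by omega))).erase (xs[(j-1).toNat]'(by omega))
          else (bumpB w (xs[(j+m-1).toNat]'(by omega))).insert (xs[(j-1).toNat]'(by omega))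
            ((bumpB w (xs[(j+m-1).toNat]'(by omega))).getD (xs[(j-1).toNat]'(by omega)) 0 - 1))
            (PySem.Dict.counter ylist) then res ++ [j] else res)) := by
      unfold slideStepB
      rw [hout, hin]
    rw [List.foldl_cons, hstep]
    rw [ih (j+1) _ _ (by omega)
      (by push_cast; push_cast at hlen; omega)
      (by rw [show (j+1-1 : Int) = j by ring]; exact hw2)]
    rw [dictEqB_eq hw2 (cntdict_counter ylist)]
    rw [List.filter_cons]
    by_cases hq : ylist.Perm (win xs j m)
    · simp [hq]
    · simp [hq]

lemma cntdict_empty : CntDict [] PySem.Dict.empty :=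
  ⟨by simp [PySem.Dict.keys_empty], fun c => by simp [PySem.Dict.get?_empty]⟩

lemma cPV_eq_counter (l : List Char) : computeParikhVectorA l = PySem.Dict.counter l :=
  (PySem.Dict.counter_eq_foldl l).symm

lemma foldl_bumpB_eq_counter (l : List Char) :
    l.foldl bumpB PySem.Dict.empty = PySem.Dict.counter l := by
  rw [show bumpB = fun d c => d.insert c (d.getD c 0 + 1) from rfl]
  exact PySem.Dict.foldl_insert_getD_add_one_eq_counter l

theorem main_eq (y : String) (x : String) (m : Int) (n : Int)
    (hpre : Pre_bruteForceApproach y x m n) :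
    bruteForceApproach y x m n = bruteForceApproach_alt y x m n := by
  unfold bruteForceApproach bruteForceApproach_alt
  by_cases hlim : n - m ≤ 0
  · rw [PySem.List.pyRange_one_eq_nil hlim, if_pos hlim]
    simp
  · rw [if_neg hlim]
    rw [foldl_bumpB_eq_counter, cPV_eq_counter]
    by_cases hm0 : m ≤ 0
    · -- empty windows: A compares against the empty dict every time
      rw [if_pos hm0, PySem.List.pyRange_one_eq_nil hm0]
      simp only [List.foldl_nil]
      have hchk : checkParikhVectorA (PySem.Dict.counter y.toList) PySem.Dict.empty
          = decide (List.Perm [] y.toList) := checkA_eq (cntdict_counter y.toList) cntdict_empty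
      by_cases hy : y.toList = []
      · have hq : decide (List.Perm [] y.toList) = true := by simp [hy]
        simp only [hchk, hq, eq_self_iff_true, if_true]
        rw [PySem.List.foldl_append_singleton_eq_self]
        rw [if_pos (by simp [hy, PySem.Dict.size]; rfl)]
        simp
      · have hq : ¬ (decide (List.Perm [] y.toList) = true) := by
          simp only [decide_eq_true_eq, List.nil_perm]
          exact fun h => hy h
        simp only [hchk, hq, Bool.false_eq_true, if_false]
        rw [PySem.List.foldl_ignore]
        rw [if_neg ?hsz]
        case hsz =>
          intro hsz
          rcases hy' : y.toList with _ | ⟨c, t⟩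
          · exact hy hy'
          · rw [PySem.Dict.size, PySem.Dict.items_counter] at hsz
            have hmem : c ∈ PySem.Set.ofList y.toList := (PySem.Set.mem_ofList _ _).mpr (by rw [hy']; simp)
            have hne : PySem.Set.ofList y.toList ≠ [] := fun h => by simp [h] at hmem
            simp [List.length_eq_zero_iff] at hsz
            exact hne hsz
    · -- the real sliding case
      rw [if_neg hm0]
      have hm : 1 ≤ m := by omega
      have hlen : n ≤ (x.toList.length : Int) + 1 := by
        rcases hpre with h | h | h <;> first | omega | exact h
      -- A's outer loop is a filter over window starts
      have hA : (PySem.List.pyRange 0 (n - m)).foldl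
          (fun indices i =>
            let st := (PySem.List.pyRange 0 m).foldl (fun st _ => innerStepA x.toList st) (PySem.Dict.empty, i)
            if checkParikhVectorA (PySem.Dict.counter y.toList) st.1 then indices ++ [i] else indices) []
          = ([] : List Int) ++ (PySem.List.pyRange 0 (n - m)).filter
              (fun i => decide (y.toList.Perm (win x.toList i m))) := by
        rw [PySem.List.foldl_congr_mem _ _
          (fun indices i => if (fun i => decide (y.toList.Perm (win x.toList i m))) i = true
            then indices ++ [i] else indices) _ ?_]
        · exact PySem.List.foldl_append_if_eq_filter _ _ _
        · intro acc i hi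
          rw [PySem.List.mem_pyRange_one] at hi
          have hsc := innerA_scan x.toList m.toNat 0 PySem.Dict.empty i hi.1 (by omega)
          rw [show ((0:Int) + (m.toNat : Int)) = m by omega] at hsc
          simp only [hsc]
          rw [show ((x.toList.drop i.toNat).take m.toNat).foldl
              (fun d c => d.modify c 0 (· + 1)) PySem.Dict.empty
            = PySem.Dict.counter (win x.toList i m) from (PySem.Dict.counter_eq_foldl _).symm]
          rw [checkA_eq (cntdict_counter y.toList) (cntdict_counter (win x.toList i m))]
          congr 1
          simp [List.perm_comm]
      rw [hA]
      -- B's pieces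
      have hw0 : (PySem.List.slice x.toList (some 0) (some m)).foldl bumpB PySem.Dict.empty
          = PySem.Dict.counter (win x.toList 0 m) := by
        rw [PySem.List.slice_zero_start, PySem.List.slice_to x.toList (by omega)]
        rw [foldl_bumpB_eq_counter]
        rw [show win x.toList 0 m = x.toList.take m.toNat by simp [win]]
      rw [hw0]
      have hrange : PySem.List.pyRange 1 (n - m) = PySem.List.pyRange 1 (1 + ((n - m - 1).toNat : Int)) := by
        congr 1
        omega
      rw [hrange, slideB_scan x.toList y.toList m hm (n - m - 1).toNat 1
        (PySem.Dict.counter (win x.toList 0 m))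
        (if dictEqB (PySem.Dict.counter (win x.toList 0 m)) (PySem.Dict.counter y.toList) then [0] else [])
        le_rfl (by omega) (by rw [show (1 - 1 : Int) = 0 by ring]; exact cntdict_counter _)]
      rw [dictEqB_eq (cntdict_counter (win x.toList 0 m)) (cntdict_counter y.toList)]
      rw [← hrange]
      rw [show PySem.List.pyRange 0 (n - m) = 0 :: PySem.List.pyRange 1 (n - m) from by
        rw [PySem.List.pyRange_one_cons (by omega : (0:Int) < n - m)]; norm_num]
      rw [List.filter_cons]
      by_cases hq : y.toList.Perm (win x.toList 0 m)
      · simp [hq]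
      · simp [hq]

-- ===== VERDICT (by name: the statement is the Claim_ definition above) =====
theorem bruteForceApproach_spec : Claim_equal_bruteForceApproach := by
  intro y x m n _ hpre
  unfold Spec_bruteForceApproach
  exact main_eq y x m n hpre
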